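-- pv_equiv track=rewrite | github.com/NgocTanHoang/AI-Agent-System-for-Marketing-and-Reporting-Automation | app.py | _fix_md_tables
-- ===== SOURCE A (Python) =====
-- def _fix_md_tables(text: str) -> str:
--     """
--     Đảm bảo bảng Markdown luôn có blank line trước và sau.
--     Thư viện python-markdown yêu cầu blank line trước | để kích hoạt table parser.
--     LLM thường generate text ngay liền trước bảng → table bị render ra text thô.
--     """
--     lines = text.split("\n")
--     result = []
--     for i, line in enumerate(lines):
--         is_table_line = line.strip().startswith("|") and line.strip().endswith("|")
--         prev_is_table = (i > 0 and lines[i-1].strip().startswith("|")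
--                          and lines[i-1].strip().endswith("|"))
--         next_is_table = (i < len(lines)-1 and lines[i+1].strip().startswith("|")
--                          and lines[i+1].strip().endswith("|"))
--
--         if is_table_line and not prev_is_table:
--             # Chèn blank line trước bảng nếu chưa có
--             if result and result[-1].strip() != "":
--                 result.append("")
--
--         result.append(line)
--
--         if is_table_line and not next_is_table:
--             # Chèn blank line sau bảng nếu dòng tiếp theo không phải table
--             if i < len(lines)-1 and lines[i+1].strip() != "":
--                 result.append("")
--
--     return "\n".join(result)
-- ===== SOURCE B (Python) =====
-- def _fix_md_tables(text: str) -> str: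
--     """Group lines into maximal table/non-table runs, then emit runs with
--     blank-line padding around table runs (same result as the per-line version)."""
--     def is_tbl(line):
--         s = line.strip()
--         return s.startswith("|") and s.endswith("|")
--
--     lines = text.split("\n")
--     runs = []
--     for line in lines:
--         f = is_tbl(line)
--         if runs and runs[-1][0] == f:
--             runs[-1][1].append(line)
--         else:
--             runs.append((f, [line]))
--
--     out = []
--     prev_line = None
--     for (f, chunk), nxt in zip(runs, runs[1:] + [None]):
--         if f and prev_line is not None and prev_line.strip() != "":
--             out.append("")
--         out.extend(chunk)
--         if f and nxt is not None and nxt[1][0].strip() != "":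
--             out.append("")
--         prev_line = chunk[-1]
--     return "\n".join(out)
-- ===== Notes on version B (the rewrite author's own statement) =====
-- stated objective: alternative
-- what changed: Replaces A's per-line pass (which classifies every line and re-inspects lines[i-1]/lines[i+1] by index) with a two-phase pass: group the lines into maximal table/non-table runs, then emit the runs, padding each table run with a blank line at its boundaries.
import Mathlib
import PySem

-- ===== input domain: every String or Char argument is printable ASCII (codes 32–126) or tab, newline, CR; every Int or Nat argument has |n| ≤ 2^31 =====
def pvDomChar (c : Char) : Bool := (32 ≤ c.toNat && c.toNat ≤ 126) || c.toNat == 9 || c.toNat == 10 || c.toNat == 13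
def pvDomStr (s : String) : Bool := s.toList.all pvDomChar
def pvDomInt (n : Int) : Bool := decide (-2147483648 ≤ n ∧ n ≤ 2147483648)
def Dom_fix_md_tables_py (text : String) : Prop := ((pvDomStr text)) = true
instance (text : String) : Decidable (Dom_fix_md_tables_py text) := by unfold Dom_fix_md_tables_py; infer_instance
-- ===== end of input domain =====

-- B replaces A's per-line prev/next index classification by a run-based pass (group the lines
-- into maximal table/non-table runs, pad table runs at their run boundaries); alternative decomposition, same cost.

-- ===== PORT A =====
-- `line.strip().startswith("|") and line.strip().endswith("|")` (used by both versions)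
def pvTbl (s : String) : Bool :=
  PySem.Str.startswith (PySem.Str.strip s) "|" && PySem.Str.endswith (PySem.Str.strip s) "|"

-- the body of A's `for i, line in enumerate(lines)` loop; `result` is the accumulator
def pvStepA (lines : List String) (result : List String) (p : Int × String) : List String :=
  let i := p.1
  let line := p.2
  let is_table_line := pvTbl line
  let prev_is_table := decide (0 < i) && pvTbl ((PySem.List.pyGet? lines (i - 1)).getD "")
  let next_is_table := decide (i < PySem.List.len lines - 1) && pvTbl ((PySem.List.pyGet? lines (i + 1)).getD "")
  let result :=
    if is_table_line && !prev_is_table && !result.isEmpty &&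
        (PySem.Str.strip ((PySem.List.pyGet? result (-1)).getD "") != "") then
      result ++ [""]
    else result
  let result := result ++ [line]
  if is_table_line && !next_is_table && decide (i < PySem.List.len lines - 1) &&
      (PySem.Str.strip ((PySem.List.pyGet? lines (i + 1)).getD "") != "") then
    result ++ [""]
  else result

def fix_md_tables_py (text : String) : String :=
  let lines := (PySem.Str.split? text "\n").getD []   -- sep is the literal "\n" ≠ "", so split? is always `some`
  let result := (PySem.List.enumerate lines).foldl (pvStepA lines) []
  PySem.Str.join "\n" result

-- ===== PORT B =====
-- the body of B's run-grouping loop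
def pvRunStep (runs : List (Bool × List String)) (line : String) : List (Bool × List String) :=
  let f := pvTbl line
  match runs.getLast? with
  | some r => if r.1 == f then runs.dropLast ++ [(r.1, r.2 ++ [line])] else runs ++ [(f, [line])]
  | none => runs ++ [(f, [line])]

-- `prev_line is not None and prev_line.strip() != ""`
def pvPrevNonblank : Option String → Bool
  | some p => PySem.Str.strip p != ""
  | none => false

-- `nxt is not None and nxt[1][0].strip() != ""`
def pvNextNonblank : Option (Bool × List String) → Bool
  | some nr => PySem.Str.strip ((PySem.List.pyGet? nr.2 0).getD "") != ""
  | none => false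

-- the body of B's emitting loop; state = (out, prev_line)
def pvEmitStep (st : List String × Option String)
    (q : (Bool × List String) × Option (Bool × List String)) : List String × Option String :=
  let out := if q.1.1 && pvPrevNonblank st.2 then st.1 ++ [""] else st.1
  let out := out ++ q.1.2
  let out := if q.1.1 && pvNextNonblank q.2 then out ++ [""] else out
  (out, some ((PySem.List.pyGet? q.1.2 (-1)).getD ""))

def fix_md_tables_py_alt (text : String) : String :=
  let lines := (PySem.Str.split? text "\n").getD []   -- sep is the literal "\n" ≠ "", so split? is always `some`
  let runs := lines.foldl pvRunStep []
  let st := (runs.zip ((runs.drop 1).map some ++ [none])).foldl pvEmitStep ([], none)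
  PySem.Str.join "\n" st.1

-- ===== PRECONDITION & SPEC =====
def Spec_fix_md_tables_py (text : String) (out : String) : Prop := out = fix_md_tables_py_alt text
instance (text : String) (out : String) : Decidable (Spec_fix_md_tables_py text out) := by unfold Spec_fix_md_tables_py; infer_instance

-- ===== CLAIM (what is proved, stated in full; the proofs are below) =====
def Claim_equal_fix_md_tables_py : Prop := ∀ (text : String), Dom_fix_md_tables_py text → Spec_fix_md_tables_py text (fix_md_tables_py text)

-- ===== LEMMAS AND PROOFS =====

-- ===== reference =====
def pvGoBefore : Option String → Bool
  | some p => !pvTbl p && (PySem.Str.strip p != "")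
  | none => false

def pvGoAfter (t : Bool) : Option String → List String
  | some nx => if t && !pvTbl nx && (PySem.Str.strip nx != "") then [""] else []
  | none => []

def pvGo : Option String → List String → List String
  | _, [] => []
  | prev, l :: rest =>
    (if pvTbl l && pvGoBefore prev then [""] else [])
    ++ l :: (pvGoAfter (pvTbl l) rest.head? ++ pvGo (some l) rest)

def pvPadAfter : Option String → List String
  | some nx => if PySem.Str.strip nx != "" then [""] else []
  | none => []

theorem pvZip_cons (r : Bool × List String) (rest : List (Bool × List String)) :
    ((r :: rest).zip (((r :: rest).drop 1).map some ++ [none])) =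
      (r, rest.head?) :: (rest.zip ((rest.drop 1).map some ++ [none])) := by
  cases rest <;> simp

theorem pvGo_plain_chunk (c : List String) (hc : c ≠ []) (prev : Option String)
    (tail : List String) (h : ∀ x ∈ c, pvTbl x = false) :
    pvGo prev (c ++ tail) = c ++ pvGo (some (c.getLast hc)) tail := by
  induction c generalizing prev with
  | nil => cases hc rfl
  | cons x c ih =>
    have hx : pvTbl x = false := h x (by simp)
    rcases c with _ | ⟨y, c'⟩
    · cases tail <;> simp [pvGo, pvGoAfter, hx]
    · have hrec := ih (by simp) (some x) (fun z hz => h z (by simp [hz]))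
      simp only [List.cons_append] at hrec ⊢
      rw [show pvGo prev (x :: (y :: (c' ++ tail))) =
            x :: pvGo (some x) (y :: (c' ++ tail)) from by simp [pvGo, pvGoAfter, hx], hrec]
      simp [List.getLast_cons]

theorem pvGo_table_chunk (c : List String) (hc : c ≠ []) (prev : Option String)
    (tail : List String) (h : ∀ x ∈ c, pvTbl x = true)
    (ht : ∀ nx, tail.head? = some nx → pvTbl nx = false) :
    pvGo prev (c ++ tail) =
      (if pvGoBefore prev then [""] else [])
      ++ c ++ pvPadAfter tail.head?
      ++ pvGo (some (c.getLast hc)) tail := by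
  induction c generalizing prev with
  | nil => cases hc rfl
  | cons x c ih =>
    have hx : pvTbl x = true := h x (by simp)
    rcases c with _ | ⟨y, c'⟩
    · cases tail with
      | nil => simp [pvGo, pvGoAfter, pvPadAfter, hx]
      | cons nx t => simp [pvGo, pvGoAfter, pvPadAfter, hx, ht nx rfl]
    · have hy : pvTbl y = true := h y (by simp)
      have hrec := ih (by simp) (some x) (fun z hz => h z (by simp [hz]))
      simp only [List.cons_append] at hrec ⊢
      rw [show pvGo prev (x :: (y :: (c' ++ tail))) =
            (if pvGoBefore prev then [""] else []) ++ x :: pvGo (some x) (y :: (c' ++ tail)) from by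
            simp [pvGo, pvGoAfter, hx, hy], hrec]
      simp [pvGoBefore, hx, List.getLast_cons]

def pvWF (rs : List (Bool × List String)) : Prop :=
  (∀ r ∈ rs, r.2 ≠ [] ∧ ∀ x ∈ r.2, pvTbl x = r.1) ∧
  List.IsChain (fun a b => a.1 ≠ b.1) rs

theorem pvRunStep_nil (x : String) : pvRunStep [] x = [(pvTbl x, [x])] := rfl

theorem pvRunStep_concat (init : List (Bool × List String)) (r : Bool × List String) (x : String) :
    pvRunStep (init ++ [r]) x =
      if r.1 == pvTbl x then init ++ [(r.1, r.2 ++ [x])]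
      else (init ++ [r]) ++ [(pvTbl x, [x])] := by
  unfold pvRunStep
  rw [List.getLast?_concat]
  simp

theorem pvRuns_inv (lines : List String) :
    (lines.foldl pvRunStep []).flatMap (·.2) = lines ∧ pvWF (lines.foldl pvRunStep []) := by
  induction lines using List.reverseRecOn with
  | nil => simp [pvWF]
  | append_singleton xs x ih =>
    obtain ⟨hflat, hprops, hchain⟩ := ih
    rw [List.foldl_append, List.foldl_cons, List.foldl_nil]
    rcases List.eq_nil_or_concat (xs.foldl pvRunStep []) with hnil | ⟨init, r, hr⟩
    · rw [hnil] at hflat ⊢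
      simp at hflat
      subst hflat
      simp [pvRunStep_nil, pvWF]
    · rw [List.concat_eq_append] at hr
      rw [hr] at hflat hprops hchain ⊢
      rw [pvRunStep_concat]
      by_cases hbe : r.1 = pvTbl x
      · rw [if_pos (by simp [hbe])]
        refine ⟨?_, ?_, ?_⟩
        · simp only [List.flatMap_append] at hflat ⊢
          simp [← hflat, List.append_assoc]
        · intro r' hr'
          rcases List.mem_append.1 hr' with hin | hin
          · exact hprops r' (by simp [hin])
          · simp only [List.mem_singleton] at hin
            subst hin
            refine ⟨by simp, ?_⟩
            intro z hz
            rcases List.mem_append.1 hz with hz | hz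
            · exact (hprops r (by simp)).2 z hz
            · simp only [List.mem_singleton] at hz
              subst hz
              exact hbe.symm
        · rw [List.isChain_append] at hchain ⊢
          exact ⟨hchain.1, by simp, by simpa using hchain.2.2⟩
      · rw [if_neg (by simp [hbe])]
        refine ⟨by simp only [List.flatMap_append] at hflat ⊢; simp [← hflat, List.append_assoc], ?_, ?_⟩
        · intro r' hr'
          rcases List.mem_append.1 hr' with hin | hin
          · exact hprops r' hin
          · simp only [List.mem_singleton] at hin
            subst hin
            exact ⟨by simp, by simp⟩
        · rw [List.isChain_append]
          refine ⟨hchain, by simp, ?_⟩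
          simpa [List.getLast?_concat] using hbe

theorem pvB_emit (rs : List (Bool × List String)) (out : List String) (prev : Option String)
    (hwf : pvWF rs)
    (hcompat : ∀ p r, prev = some p → rs.head? = some r → r.1 = true → pvTbl p = false) :
    ((rs.zip ((rs.drop 1).map some ++ [none])).foldl pvEmitStep (out, prev)).1
      = out ++ pvGo prev (rs.flatMap (·.2)) := by
  induction rs generalizing out prev with
  | nil => simp [pvGo]
  | cons r rest ih =>
    obtain ⟨f, c⟩ := r
    obtain ⟨hprops, hchain⟩ := hwf
    obtain ⟨hcne, hcall⟩ := hprops (f, c) (by simp)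
    have hlast : (PySem.List.pyGet? c (-1)).getD "" = c.getLast hcne := by
      rw [PySem.List.pyGet?_neg_one, List.getLast?_eq_some_getLast hcne]
      rfl
    rw [pvZip_cons, List.foldl_cons]
    have hstep : pvEmitStep (out, prev) ((f, c), rest.head?) =
        ((if f && pvPrevNonblank prev then out ++ [""] else out) ++ c ++
         (if f && pvNextNonblank rest.head? then [""] else []),
         some (c.getLast hcne)) := by
      simp only [pvEmitStep, hlast]
      split <;> simp
    rw [hstep]
    have hwf' : pvWF rest := ⟨fun r hr => hprops r (by simp [hr]), hchain.tail⟩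
    have hcompat' : ∀ p r, (some (c.getLast hcne) : Option String) = some p →
        rest.head? = some r → r.1 = true → pvTbl p = false := by
      intro p r hp hhead htrue
      cases hp
      have hne : f ≠ r.1 := by
        cases rest with
        | nil => simp at hhead
        | cons r2 rest2 =>
          simp at hhead
          subst hhead
          exact (List.isChain_cons_cons.1 hchain).1
      rw [hcall _ (List.getLast_mem hcne)]
      exact Bool.eq_false_iff.mpr (fun hf => hne (hf.trans htrue.symm))
    rw [ih _ _ hwf' hcompat']
    have hflat : List.flatMap (fun x => x.2) ((f, c) :: rest) = c ++ rest.flatMap (·.2) := by simp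
    rw [hflat]
    cases hf : f with
    | false =>
      have hcall' : ∀ x ∈ c, pvTbl x = false := by intro x hx; rw [hcall x hx]; exact hf
      rw [pvGo_plain_chunk c hcne prev _ hcall']
      simp
    | true =>
      have hcall' : ∀ x ∈ c, pvTbl x = true := by intro x hx; rw [hcall x hx]; exact hf
      have hthead : ∀ nx, (rest.flatMap (·.2)).head? = some nx → pvTbl nx = false := by
        intro nx hnx
        cases rest with
        | nil => simp at hnx
        | cons r2 rest2 =>
          obtain ⟨hr2ne, hr2all⟩ := hprops r2 (by simp)
          have hne : (f, c).1 ≠ r2.1 := (List.isChain_cons_cons.1 hchain).1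
          have hr2f : r2.1 = false := by
            cases h2 : r2.1
            · rfl
            · rw [hf, h2] at hne; exact absurd rfl hne
          rcases r2 with ⟨f2, c2⟩
          simp only [List.flatMap_cons] at hnx
          rw [List.head?_append] at hnx
          cases hc2 : c2 with
          | nil => exact absurd hc2 hr2ne
          | cons z zs =>
            rw [hc2] at hnx
            simp only [List.cons_append, List.head?_cons, Option.or, Option.some.injEq] at hnx
            subst hnx
            rw [hr2all z (by simp [hc2])]
            exact hr2f
      rw [pvGo_table_chunk c hcne prev _ hcall' hthead]
      have hbefore : (if pvPrevNonblank prev then out ++ [""] else out)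
          = out ++ (if pvGoBefore prev then [""] else []) := by
        cases prev with
        | none => simp [pvPrevNonblank, pvGoBefore]
        | some p =>
          have hp : pvTbl p = false := hcompat p (f, c) rfl rfl hf
          simp only [pvPrevNonblank, pvGoBefore, hp, Bool.not_false, Bool.true_and]
          split <;> simp
      have hafter : (if pvNextNonblank rest.head? then [""] else ([] : List String))
          = pvPadAfter (rest.flatMap (·.2)).head? := by
        cases rest with
        | nil => simp [pvNextNonblank, pvPadAfter]
        | cons r2 rest2 =>
          obtain ⟨hr2ne, _⟩ := hprops r2 (by simp)
          rcases r2 with ⟨f2, c2⟩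
          cases hc2 : c2 with
          | nil => exact absurd hc2 hr2ne
          | cons z zs =>
            subst hc2
            simp only [List.flatMap_cons, List.head?_append, List.head?_cons, List.head?,
              pvNextNonblank, pvPadAfter, PySem.List.pyGet?_zero]
            rfl
      simp only [Bool.true_and]
      rw [hbefore, hafter]
      simp [List.append_assoc]

theorem pvA_loop (suf pre acc : List String)
    (h1 : acc = [] ↔ pre = [])
    (h2 : ∀ p, pre.getLast? = some p → pvTbl p = false → acc.getLast? = some p) :
    (PySem.List.enumerate suf (pre.length : Int)).foldl (pvStepA (pre ++ suf)) acc
      = acc ++ pvGo pre.getLast? suf := by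
  induction suf generalizing pre acc with
  | nil => simp [PySem.List.enumerate, pvGo]
  | cons l rest ih =>
    rw [PySem.List.enumerate_cons, List.foldl_cons]
    -- evaluate the step
    have hstep : pvStepA (pre ++ l :: rest) acc ((pre.length : Int), l) =
        (acc ++ (if pvTbl l && pvGoBefore pre.getLast? then [""] else [])) ++ [l]
          ++ pvGoAfter (pvTbl l) rest.head? := by
      unfold pvStepA
      simp only []
      have hb : (pvTbl l && !(decide (0 < (pre.length : Int)) &&
            pvTbl ((PySem.List.pyGet? (pre ++ l :: rest) ((pre.length : Int) - 1)).getD "")) &&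
            !acc.isEmpty &&
            (PySem.Str.strip ((PySem.List.pyGet? acc (-1)).getD "") != ""))
          = (pvTbl l && pvGoBefore pre.getLast?) := by
        rcases List.eq_nil_or_concat pre with hpre | ⟨init, p, hpre⟩
        · subst hpre
          have hacc : acc = [] := h1.2 rfl
          subst hacc
          simp [pvGoBefore]
        · rw [List.concat_eq_append] at hpre
          subst hpre
          have hgl : (init ++ [p]).getLast? = some p := List.getLast?_concat
          have hi : ((init ++ [p]).length : Int) - 1 = (init.length : Int) := by
            simp [List.length_append]
          have hlines : (init ++ [p]) ++ l :: rest = init ++ p :: (l :: rest) := by simp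
          rw [hi, hlines, PySem.List.pyGet?_append_length]
          have hpos : decide (0 < ((init ++ [p]).length : Int)) = true := by
            simp [List.length_append]
          rw [hpos, hgl]
          simp only [Option.getD_some, Bool.true_and]
          cases hp : pvTbl p with
          | true => simp [pvGoBefore, hp]
          | false =>
            have hlast : acc.getLast? = some p := h2 p hgl hp
            have hne : acc ≠ [] := by
              intro h; rw [h] at hlast; simp at hlast
            rw [PySem.List.pyGet?_neg_one, hlast]
            have hie : acc.isEmpty = false := by simpa [List.isEmpty_iff] using hne
            simp [pvGoBefore, hp, hie, Bool.and_assoc]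
      rw [hb]
      have ha : ∀ (zs : List String), (if (pvTbl l &&
            !(decide ((pre.length : Int) < PySem.List.len (pre ++ l :: rest) - 1) &&
              pvTbl ((PySem.List.pyGet? (pre ++ l :: rest) ((pre.length : Int) + 1)).getD "")) &&
            decide ((pre.length : Int) < PySem.List.len (pre ++ l :: rest) - 1) &&
            (PySem.Str.strip ((PySem.List.pyGet? (pre ++ l :: rest) ((pre.length : Int) + 1)).getD "") != ""))
            = true then zs ++ [""] else zs)
          = zs ++ pvGoAfter (pvTbl l) rest.head? := by
        intro zs
        cases rest with
        | nil =>
          have hlt : decide ((pre.length : Int) < PySem.List.len (pre ++ [l]) - 1) = false := by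
            simp [PySem.List.len, List.length_append]
          rw [hlt]
          simp [pvGoAfter]
        | cons nx rest2 =>
          have hlt : decide ((pre.length : Int) < PySem.List.len (pre ++ l :: nx :: rest2) - 1) = true := by
            simp [PySem.List.len, List.length_append]
            omega
          have hg : PySem.List.pyGet? (pre ++ l :: nx :: rest2) ((pre.length : Int) + 1) = some nx := by
            have : pre ++ l :: nx :: rest2 = (pre ++ [l]) ++ nx :: rest2 := by simp
            rw [this, show ((pre.length : Int) + 1) = (((pre ++ [l]).length : Nat) : Int) from by
              simp [List.length_append], PySem.List.pyGet?_append_length]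
          rw [hlt, hg]
          simp only [Option.getD_some, List.head?_cons, pvGoAfter, Bool.and_true]
          cases htl : pvTbl l <;> cases hnx : pvTbl nx <;>
            cases hs : (PySem.Str.strip nx != "") <;> simp [htl, hnx, hs]
      rw [ha]
      split <;> simp
    rw [hstep]
    have hre : (pre ++ l :: rest) = ((pre ++ [l]) ++ rest) := by simp
    have hlen : ((pre.length : Int) + 1) = (((pre ++ [l]).length : Nat) : Int) := by
      simp [List.length_append]
    rw [hre, hlen, ih ((pre ++ [l]))]
    · rw [List.getLast?_concat]
      cases hrest : rest.head? <;>
        simp [pvGo, pvGoAfter, List.append_assoc, hrest]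
    · constructor
      · intro h
        exact absurd h (by simp)
      · intro h
        exact absurd h (by simp)
    · intro p hp htp
      rw [List.getLast?_concat] at hp
      cases hp
      have hafter : pvGoAfter (pvTbl l) rest.head? = [] := by
        cases hr : rest.head? with
        | none => rfl
        | some nx => simp [pvGoAfter, htp]
      rw [hafter, List.append_nil, List.getLast?_concat]

theorem pvA_eq (lines : List String) :
    (PySem.List.enumerate lines).foldl (pvStepA lines) [] = pvGo none lines := by
  simpa using pvA_loop lines [] [] (by simp) (by simp)

theorem pvB_eq (lines : List String) :
    (((lines.foldl pvRunStep []).zip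
        (((lines.foldl pvRunStep []).drop 1).map some ++ [none])).foldl pvEmitStep ([], none)).1
      = pvGo none lines := by
  obtain ⟨hflat, hwf⟩ := pvRuns_inv lines
  rw [pvB_emit _ [] none hwf (by intro p r h; simp at h)]
  rw [hflat]
  simp

-- ===== VERDICT (by name: the statement is the Claim_ definition above) =====
theorem fix_md_tables_py_spec : Claim_equal_fix_md_tables_py := by
  intro text _
  show fix_md_tables_py text = fix_md_tables_py_alt text
  unfold fix_md_tables_py fix_md_tables_py_alt
  exact congrArg (PySem.Str.join "\n") ((pvA_eq _).trans (pvB_eq _).symm)
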